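-- pv_equiv track=rewrite | github.com/Sumanta01/Python_DSA | Number_Pattern_2.py | numberPattern
-- ===== SOURCE A (Python) =====
-- def numberPattern(n):
-- 	res=[]
-- 	for i in range(n+1):
-- 		s=""
-- 		for j in range(n-i):
-- 			s=s+str(j+1)
-- 		res.append(s)
-- 	return res
-- ===== SOURCE B (Python) =====
-- def numberPattern(n):
--     asc = []
--     s = ""
--     for t in range(n + 1):
--         asc.append(s)
--         s = s + str(t + 1)
--     return list(reversed(asc))
-- ===== Notes on version B (the rewrite author's own statement) =====
-- stated objective: faster
-- what changed: Replaces the nested rebuild (each row's digit string recomputed from scratch) by a single pass that keeps a running cumulative string, appends each prefix to an ascending list, and reverses it at the end; intended as faster (a timing run measured B 8-21x faster up to n=4096, though both programs time out on one extreme input of that size).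
import Mathlib
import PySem

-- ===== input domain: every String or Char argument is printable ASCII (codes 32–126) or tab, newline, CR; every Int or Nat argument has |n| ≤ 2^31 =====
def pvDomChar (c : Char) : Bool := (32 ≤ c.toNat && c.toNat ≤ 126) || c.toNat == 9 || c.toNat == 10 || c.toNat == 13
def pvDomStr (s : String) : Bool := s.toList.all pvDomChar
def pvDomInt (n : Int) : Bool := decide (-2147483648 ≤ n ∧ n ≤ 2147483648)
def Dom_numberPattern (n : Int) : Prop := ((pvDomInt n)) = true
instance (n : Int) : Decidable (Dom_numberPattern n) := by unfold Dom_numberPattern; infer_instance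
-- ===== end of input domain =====

-- B replaces A's nested per-row rebuild by one cumulative pass plus a final reverse (intended as faster; a timing run measured B ahead at every size it confirmed, unconfirmed at the largest).

-- ===== PORT A =====
def numberPattern (n : Int) : List String :=
  (PySem.List.pyRange 0 (n + 1) 1).foldl
    (fun res i =>
      res ++ [(PySem.List.pyRange 0 (n - i) 1).foldl
        (fun s j => s ++ PySem.Int.toStr (j + 1)) ""])
    []

-- ===== PORT B =====
def numberPattern_alt (n : Int) : List String :=
  let st := (PySem.List.pyRange 0 (n + 1) 1).foldl
    (fun (st : List String × String) t => (st.1 ++ [st.2], st.2 ++ PySem.Int.toStr (t + 1)))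
    ([], "")
  st.1.reverse

-- ===== PRECONDITION & SPEC =====
def Spec_numberPattern (n : Int) (out : List String) : Prop := out = numberPattern_alt n
instance (n : Int) (out : List String) : Decidable (Spec_numberPattern n out) := by unfold Spec_numberPattern; infer_instance

-- ===== CLAIM (what is proved, stated in full; the proofs are below) =====
def Claim_equal_numberPattern : Prop := ∀ (n : Int), Dom_numberPattern n → Spec_numberPattern n (numberPattern n)

-- ===== LEMMAS AND PROOFS =====

/-- The digit string "12…k" both programs build, as A's inner loop computes it. -/
def pvInner (k : Int) : String :=
  (PySem.List.pyRange 0 k 1).foldl (fun s j => s ++ PySem.Int.toStr (j + 1)) ""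

theorem pvInner_succ (b : Int) (hb : 0 ≤ b) :
    pvInner (b + 1) = pvInner b ++ PySem.Int.toStr (b + 1) := by
  unfold pvInner
  rw [PySem.List.pyRange_one_succ_right hb, List.foldl_append]
  simp

theorem numberPattern_eq_map (n : Int) :
    numberPattern n = (PySem.List.pyRange 0 (n + 1) 1).map (fun i => pvInner (n - i)) := by
  unfold numberPattern pvInner
  rw [PySem.List.foldl_append_singleton_eq_map]
  simp

theorem alt_invariant (b : Int) (hb : 0 ≤ b) :
    (PySem.List.pyRange 0 b 1).foldl
      (fun (st : List String × String) t => (st.1 ++ [st.2], st.2 ++ PySem.Int.toStr (t + 1)))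
      ([], "")
    = ((PySem.List.pyRange 0 b 1).map pvInner, pvInner b) := by
  induction b, hb using Int.le_induction with
  | base =>
      rw [PySem.List.pyRange_one_eq_nil (by omega)]
      simp [pvInner, PySem.List.pyRange_one_eq_nil]
  | succ b hb ih =>
      rw [PySem.List.pyRange_one_succ_right hb, List.foldl_append, ih, List.map_append,
        pvInner_succ b hb]
      simp

theorem numberPattern_alt_eq (n : Int) :
    numberPattern_alt n = ((PySem.List.pyRange 0 (n + 1) 1).map pvInner).reverse := by
  unfold numberPattern_alt
  by_cases h : 0 ≤ n + 1
  · rw [alt_invariant (n + 1) h]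
  · rw [PySem.List.pyRange_one_eq_nil (by omega)]
    simp

theorem map_eq_reverse_map (n : Int) :
    (PySem.List.pyRange 0 (n + 1) 1).map (fun i => pvInner (n - i))
      = ((PySem.List.pyRange 0 (n + 1) 1).map pvInner).reverse := by
  rw [PySem.List.pyRange_one 0 (n + 1)]
  by_cases h : 0 ≤ n
  · have hm : (n + 1 - (0:Int)).toNat = n.toNat + 1 := by omega
    rw [hm]
    apply List.ext_getElem
    · simp
    · intro k h1 h2
      simp only [List.length_map, List.length_range] at h1 h2
      simp only [List.getElem_map, List.getElem_range, List.getElem_reverse,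
        List.length_map, List.length_range]
      congr 1
      omega
  · rw [show (n + 1 - (0:Int)).toNat = 0 by omega]
    simp

-- ===== VERDICT (by name: the statement is the Claim_ definition above) =====
theorem numberPattern_spec : Claim_equal_numberPattern := by
  intro n _
  unfold Spec_numberPattern
  rw [numberPattern_eq_map, numberPattern_alt_eq, map_eq_reverse_map]
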